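-- pv_equiv track=rewrite | github.com/dmwm/cms_consistency | cmp3/old/cmplib.py | cmp3_dark
-- ===== SOURCE A (Python) =====
-- def cmp3_dark(a, r, b):
--     #       D = R-A-B = (R-A)-B
--     d = set(r)
--     for x in a:
--         try:    d.remove(x)
--         except KeyError: pass
--     for x in b:
--         try:    d.remove(x)
--         except KeyError: pass
--     return list(d)
-- ===== SOURCE B (Python) =====
-- def cmp3_dark(a, r, b):
--     # D = R - A - B: filter the distinct elements of r by membership tests
--     aset = set(a)
--     bset = set(b)
--     return [x for x in set(r) if x not in aset and x not in bset]
-- ===== Notes on version B (the rewrite author's own statement) =====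
-- stated objective: simpler
-- what changed: Instead of materialising set(r) and destructively removing each element of a and b with try/except KeyError, B builds set(a) and set(b) once and keeps in one membership-filter pass exactly the distinct elements of r absent from both.
import Mathlib
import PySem

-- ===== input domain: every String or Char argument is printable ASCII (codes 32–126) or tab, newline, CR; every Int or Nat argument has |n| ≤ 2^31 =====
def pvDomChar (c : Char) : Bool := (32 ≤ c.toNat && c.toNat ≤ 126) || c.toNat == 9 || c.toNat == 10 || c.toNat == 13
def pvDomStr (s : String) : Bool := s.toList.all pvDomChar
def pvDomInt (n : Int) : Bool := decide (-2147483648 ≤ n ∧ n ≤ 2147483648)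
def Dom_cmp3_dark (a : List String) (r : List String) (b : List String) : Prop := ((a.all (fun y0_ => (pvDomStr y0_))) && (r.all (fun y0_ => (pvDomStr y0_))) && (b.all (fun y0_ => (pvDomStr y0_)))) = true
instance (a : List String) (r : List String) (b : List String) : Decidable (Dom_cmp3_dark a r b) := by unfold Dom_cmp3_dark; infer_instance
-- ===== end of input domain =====

-- B replaces A's destructive removal loops (d = set(r); d.remove(x) with KeyError swallowed)
-- by one membership filter over set(r) against prebuilt set(a)/set(b); objective: simpler.
-- Set iteration/list(d) order follows PySem.Set's first-insertion order.

-- ===== PORT A =====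
def cmp3_dark (a : List String) (r : List String) (b : List String) : List String :=
  -- d = set(r)
  let d := PySem.Set.ofList r
  -- for x in a: try d.remove(x) except KeyError: pass   (= discard)
  let d := a.foldl (fun d x => PySem.Set.discard d x) d
  -- for x in b: try d.remove(x) except KeyError: pass
  let d := b.foldl (fun d x => PySem.Set.discard d x) d
  -- return list(d)
  d

-- ===== PORT B =====
def cmp3_dark_alt (a : List String) (r : List String) (b : List String) : List String :=
  let aset := PySem.Set.ofList a
  let bset := PySem.Set.ofList b
  (PySem.Set.ofList r).filter (fun x => !(PySem.Set.contains aset x) && !(PySem.Set.contains bset x))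

-- ===== PRECONDITION & SPEC =====
def Spec_cmp3_dark (a : List String) (r : List String) (b : List String) (out : List String) : Prop := out = cmp3_dark_alt a r b
instance (a : List String) (r : List String) (b : List String) (out : List String) : Decidable (Spec_cmp3_dark a r b out) := by unfold Spec_cmp3_dark; infer_instance

-- ===== CLAIM (what is proved, stated in full; the proofs are below) =====
def Claim_equal_cmp3_dark : Prop := ∀ (a : List String) (r : List String) (b : List String), Dom_cmp3_dark a r b → Spec_cmp3_dark a r b (cmp3_dark a r b)

-- ===== LEMMAS AND PROOFS =====

-- the removal loop of A is one filter by non-membership in the removed list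
theorem foldl_discard_eq_filter (l : List String) (s : List String) :
    l.foldl (fun d x => PySem.Set.discard d x) s = s.filter (fun y => !(l.contains y)) := by
  induction l generalizing s with
  | nil => simp
  | cons x xs ih =>
    rw [List.foldl_cons, ih]
    simp only [PySem.Set.discard, List.filter_filter]
    apply List.filter_congr
    intro y _
    by_cases h : y = x <;> simp [h]

-- membership in set(l) tests the same as membership in l
theorem contains_ofList (l : List String) (y : String) :
    PySem.Set.contains (PySem.Set.ofList l) y = l.contains y := by
  by_cases h : y ∈ l
  · simp [PySem.Set.mem_ofList, h]
  · simp only [List.contains_eq_mem]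
    rw [Bool.eq_iff_iff]
    simp [PySem.Set.mem_ofList, h]

-- ===== VERDICT (by name: the statement is the Claim_ definition above) =====
theorem cmp3_dark_spec : Claim_equal_cmp3_dark := by
  intro a r b _
  unfold Spec_cmp3_dark cmp3_dark cmp3_dark_alt
  simp only [foldl_discard_eq_filter, List.filter_filter, contains_ofList]
  apply List.filter_congr
  intro y _
  by_cases ha : y ∈ a <;> by_cases hb : y ∈ b <;> simp [ha, hb]
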